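-- pv_equiv track=rewrite | github.com/SmartDataAnalytics/codeCAI | nl2codemodel/src/nltocode/eval/score.py | filter_ast_seq
-- ===== SOURCE A (Python) =====
-- def filter_ast_seq(ast_seq_list, tgt_vocab_size):
--     replaced_ast_seq = [tgt_vocab_size + 1 if vocab_id > tgt_vocab_size else vocab_id for vocab_id in ast_seq_list]
--     replaced_filtered_ast_seq = []
--     for i in replaced_ast_seq:
--         if (i != tgt_vocab_size + 1) or (len(replaced_filtered_ast_seq) == 0) or (
--                 replaced_filtered_ast_seq[-1] != tgt_vocab_size + 1):
--             replaced_filtered_ast_seq.append(i)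
--
--     return replaced_filtered_ast_seq
-- ===== SOURCE B (Python) =====
-- def filter_ast_seq(ast_seq_list, tgt_vocab_size):
--     # Single streaming pass: remember only whether the previous id was
--     # out-of-vocabulary, instead of clamping first and re-reading out[-1].
--     sentinel = tgt_vocab_size + 1
--     out = []
--     prev_oov = False
--     for v in ast_seq_list:
--         oov = v > tgt_vocab_size
--         if not (oov and prev_oov):
--             out.append(sentinel if oov else v)
--         prev_oov = oov
--     return out
-- ===== Notes on version B (the rewrite author's own statement) =====
-- stated objective: simpler
-- what changed: B replaces A's two sequential passes (a clamping list comprehension, then a collapse loop that re-reads out[-1]) by one streaming pass that carries a single boolean 'previous id was out-of-vocab' flag and never inspects the output list.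
import Mathlib
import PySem

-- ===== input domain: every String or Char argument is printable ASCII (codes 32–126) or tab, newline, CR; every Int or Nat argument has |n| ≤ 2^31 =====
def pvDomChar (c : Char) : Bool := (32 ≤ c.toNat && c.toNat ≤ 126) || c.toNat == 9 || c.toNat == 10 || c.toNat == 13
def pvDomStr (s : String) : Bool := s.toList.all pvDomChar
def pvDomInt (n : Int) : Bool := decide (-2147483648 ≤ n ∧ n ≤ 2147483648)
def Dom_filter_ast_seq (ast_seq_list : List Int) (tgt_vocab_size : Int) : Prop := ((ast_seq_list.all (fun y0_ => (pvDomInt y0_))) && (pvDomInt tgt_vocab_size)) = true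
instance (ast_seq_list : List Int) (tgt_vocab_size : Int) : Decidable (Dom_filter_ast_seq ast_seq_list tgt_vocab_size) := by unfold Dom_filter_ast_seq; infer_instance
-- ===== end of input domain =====

-- B fuses A's clamp pass and collapse pass into one streaming pass carrying a
-- 'previous id was out-of-vocab' flag (objective: simpler; return value only).
-- ===== PORT A =====
def filter_ast_seq (ast_seq_list : List Int) (tgt_vocab_size : Int) : List Int :=
  let replaced_ast_seq := ast_seq_list.map
    (fun vocab_id => if vocab_id > tgt_vocab_size then tgt_vocab_size + 1 else vocab_id)
  replaced_ast_seq.foldl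
    (fun acc i =>
      if i ≠ tgt_vocab_size + 1 ∨ acc.length = 0 ∨ acc.getLast? ≠ some (tgt_vocab_size + 1) then
        acc ++ [i]
      else acc) []

-- ===== PORT B =====
def filterAstSeqAltGo (tgt_vocab_size : Int) : List Int → Bool → List Int
  | [], _ => []
  | v :: rest, prev_oov =>
    let oov := v > tgt_vocab_size
    if oov ∧ prev_oov then filterAstSeqAltGo tgt_vocab_size rest oov
    else (if oov then tgt_vocab_size + 1 else v) :: filterAstSeqAltGo tgt_vocab_size rest oov

def filter_ast_seq_alt (ast_seq_list : List Int) (tgt_vocab_size : Int) : List Int :=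
  filterAstSeqAltGo tgt_vocab_size ast_seq_list false

-- ===== PRECONDITION & SPEC =====
def Spec_filter_ast_seq (ast_seq_list : List Int) (tgt_vocab_size : Int) (out : List Int) : Prop := out = filter_ast_seq_alt ast_seq_list tgt_vocab_size
instance (ast_seq_list : List Int) (tgt_vocab_size : Int) (out : List Int) : Decidable (Spec_filter_ast_seq ast_seq_list tgt_vocab_size out) := by unfold Spec_filter_ast_seq; infer_instance

-- ===== CLAIM (what is proved, stated in full; the proofs are below) =====
def Claim_equal_filter_ast_seq : Prop := ∀ (ast_seq_list : List Int) (tgt_vocab_size : Int), Dom_filter_ast_seq ast_seq_list tgt_vocab_size → Spec_filter_ast_seq ast_seq_list tgt_vocab_size (filter_ast_seq ast_seq_list tgt_vocab_size)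

-- ===== LEMMAS AND PROOFS =====

-- ===== VERDICT (by name: the statement is the Claim_ definition above) =====
theorem filter_ast_seq_key (tgt : Int) (xs : List Int) :
    ∀ (acc : List Int) (prev : Bool),
      prev = decide (acc.getLast? = some (tgt + 1)) →
      (xs.map (fun v => if v > tgt then tgt + 1 else v)).foldl
        (fun acc i =>
          if i ≠ tgt + 1 ∨ acc.length = 0 ∨ acc.getLast? ≠ some (tgt + 1) then acc ++ [i]
          else acc) acc
      = acc ++ filterAstSeqAltGo tgt xs prev := by
  induction xs with
  | nil => intro acc prev _; simp [filterAstSeqAltGo]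
  | cons v rest ih =>
    intro acc prev hprev
    simp only [List.map_cons, List.foldl_cons, filterAstSeqAltGo]
    by_cases hoov : v > tgt
    · rw [if_pos hoov]
      have hdec : decide (v > tgt) = true := decide_eq_true hoov
      by_cases hp : prev = true
      · -- oov ∧ prev: A skips (last of acc is the sentinel), B skips
        have hlast : acc.getLast? = some (tgt + 1) :=
          of_decide_eq_true (hprev ▸ hp)
        have hne : acc.length ≠ 0 := by
          intro h0
          rw [List.eq_nil_of_length_eq_zero h0] at hlast; simp at hlast
        rw [if_neg (by simp [hlast, hne]), if_pos ⟨hoov, hp⟩, hdec]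
        exact ih acc true (decide_eq_true hlast).symm
      · -- oov, ¬prev: both append the sentinel
        have hlast : ¬ acc.getLast? = some (tgt + 1) := by
          intro h; exact hp (by rw [hprev]; exact decide_eq_true h)
        rw [if_pos (Or.inr (Or.inr hlast)), if_neg (by tauto), hdec]
        rw [ih (acc ++ [tgt + 1]) true (by simp)]
        simp
    · -- not oov: both append v unchanged; new last is v ≠ tgt+1 since v ≤ tgt
      have hvne : v ≠ tgt + 1 := by omega
      rw [if_neg hoov, if_pos (Or.inl hvne), if_neg (by tauto), decide_eq_false hoov]
      rw [ih (acc ++ [v]) false (by simp [hvne])]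
      simp

theorem filter_ast_seq_spec : Claim_equal_filter_ast_seq := by
  intro xs tgt _
  unfold Spec_filter_ast_seq filter_ast_seq filter_ast_seq_alt
  simpa using filter_ast_seq_key tgt xs [] false (by simp)
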